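-- pv_equiv track=rewrite | github.com/NetroAki/cosmic-horizons-extended | scripts/validate_minerals.py | strip_json5_comments
-- ===== SOURCE A (Python) =====
-- def strip_json5_comments(text: str) -> str:
--     out = []
--     in_str = False
--     esc = False
--     i = 0
--     while i < len(text):
--         c = text[i]
--         if in_str:
--             out.append(c)
--             if esc:
--                 esc = False
--             elif c == '\\':
--                 esc = True
--             elif c == '"':
--                 in_str = False
--             i += 1
--             continue
--         if c == '"':
--             in_str = True
--             out.append(c)
--             i += 1
--             continue
--         if c == '/' and i + 1 < len(text):
--             n = text[i+1]
--             if n == '/':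
--                 # line comment
--                 i += 2
--                 while i < len(text) and text[i] not in '\r\n':
--                     i += 1
--                 continue
--             if n == '*':
--                 # block comment
--                 i += 2
--                 while i + 1 < len(text) and not (text[i] == '*' and text[i+1] == '/'):
--                     i += 1
--                 i += 2
--                 continue
--         out.append(c)
--         i += 1
--     return ''.join(out)
-- ===== SOURCE B (Python) =====
-- def strip_json5_comments(text: str) -> str:
--     # Flat one-pass DFA (no indices, no lookahead, no nested loops):
--     # a pending-slash state replaces A's two-character lookahead.
--     N, S, SE, SL, LC, BC, BCS = range(7)
--     mode = N
--     out = []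
--     for c in text:
--         if mode == N:
--             if c == '"':
--                 out.append(c)
--                 mode = S
--             elif c == '/':
--                 mode = SL
--             else:
--                 out.append(c)
--         elif mode == S:
--             out.append(c)
--             if c == '\\':
--                 mode = SE
--             elif c == '"':
--                 mode = N
--         elif mode == SE:
--             out.append(c)
--             mode = S
--         elif mode == SL:
--             if c == '/':
--                 mode = LC
--             elif c == '*':
--                 mode = BC
--             else:
--                 out.append('/')
--                 out.append(c)
--                 mode = S if c == '"' else N
--         elif mode == LC:
--             if c in '\r\n':
--                 out.append(c)
--                 mode = N
--         elif mode == BC: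
--             if c == '*':
--                 mode = BCS
--         else:  # BCS
--             if c == '/':
--                 mode = N
--             elif c != '*':
--                 mode = BC
--     if mode == SL:
--         out.append('/')
--     return ''.join(out)
-- ===== Notes on version B (the rewrite author's own statement) =====
-- stated objective: alternative
-- what changed: Replaced A's index-based scanner with nested while loops and two-character lookahead by a flat one-pass seven-state DFA over the characters, using a pending-slash state instead of lookahead and a single final flush.
import Mathlib
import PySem

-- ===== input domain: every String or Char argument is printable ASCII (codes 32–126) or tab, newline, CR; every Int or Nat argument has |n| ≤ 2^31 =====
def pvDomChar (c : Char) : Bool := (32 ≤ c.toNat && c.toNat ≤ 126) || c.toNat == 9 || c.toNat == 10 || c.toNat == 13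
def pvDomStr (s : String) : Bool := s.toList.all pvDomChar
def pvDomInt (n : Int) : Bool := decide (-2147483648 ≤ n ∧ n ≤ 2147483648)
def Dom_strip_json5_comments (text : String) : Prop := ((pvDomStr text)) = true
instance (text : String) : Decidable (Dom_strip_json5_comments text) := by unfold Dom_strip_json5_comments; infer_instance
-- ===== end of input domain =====

-- B replaces A's index/lookahead machine (nested while loops, two-char lookahead) with a
-- flat one-pass DFA over the characters (a pending-slash state instead of lookahead);
-- same cost, simpler control flow.

-- ===== PORT A =====
-- A's inner `while i < len(text) and text[i] not in '\r\n'` loop: returns the suffix at the newline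
def pvSkipLine : List Char → List Char
  | [] => []
  | c :: rest => if c = '\r' ∨ c = '\n' then c :: rest else pvSkipLine rest

-- A's inner block-comment loop together with the final `i += 2`
def pvSkipBlock : List Char → List Char
  | [] => []
  | [_] => []
  | c1 :: c2 :: rest => if c1 = '*' ∧ c2 = '/' then rest else pvSkipBlock (c2 :: rest)

theorem pvSkipLine_len_le : ∀ l : List Char, (pvSkipLine l).length ≤ l.length := by
  intro l; induction l with
  | nil => simp [pvSkipLine]
  | cons c rest ih =>
      simp only [pvSkipLine]
      split
      · simp
      · simp only [List.length_cons]; omega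

theorem pvSkipBlock_len_le (l : List Char) : (pvSkipBlock l).length ≤ l.length := by
  induction l with
  | nil => simp [pvSkipBlock]
  | cons c rest ih =>
    cases rest with
    | nil => simp [pvSkipBlock]
    | cons c2 r =>
      simp only [pvSkipBlock]
      split
      · simp only [List.length_cons]; omega
      · simp only [List.length_cons] at ih ⊢; omega

-- A's main while loop: state = (remaining suffix, in_str, esc, out)
def pvGoA : List Char → Bool → Bool → List Char → List Char
  | [], _, _, out => out
  | c :: rest, true, esc, out =>
      let out' := out ++ [c]
      if esc then pvGoA rest true false out'
      else if c = '\\' then pvGoA rest true true out'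
      else if c = '"' then pvGoA rest false false out'
      else pvGoA rest true false out'
  | c :: rest, false, esc, out =>
      if c = '"' then pvGoA rest true esc (out ++ [c])
      else if c = '/' then
        match rest with
        | n :: rest' =>
          if n = '/' then pvGoA (pvSkipLine rest') false esc out
          else if n = '*' then pvGoA (pvSkipBlock rest') false esc out
          else pvGoA (n :: rest') false esc (out ++ [c])
        | [] => pvGoA [] false esc (out ++ [c])
      else pvGoA rest false esc (out ++ [c])
termination_by l _ _ _ => l.length
decreasing_by
  all_goals simp only [List.length_cons]
  all_goals first
    | omega
    | (have := pvSkipLine_len_le rest'; omega)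
    | (have := pvSkipBlock_len_le rest'; omega)

def strip_json5_comments (text : String) : String :=
  String.ofList (pvGoA text.toList false false [])

-- ===== PORT B =====
inductive PvMode where
  | N | S | SE | SL | LC | BC | BCS
deriving DecidableEq, Repr

-- one step of Source B's for-loop body
def pvStepB : PvMode × List Char → Char → PvMode × List Char
  | (.N, out), c =>
      if c = '"' then (.S, out ++ [c])
      else if c = '/' then (.SL, out)
      else (.N, out ++ [c])
  | (.S, out), c =>
      let out' := out ++ [c]
      if c = '\\' then (.SE, out')
      else if c = '"' then (.N, out')
      else (.S, out')
  | (.SE, out), c => (.S, out ++ [c])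
  | (.SL, out), c =>
      if c = '/' then (.LC, out)
      else if c = '*' then (.BC, out)
      else ((if c = '"' then .S else .N), out ++ ['/'] ++ [c])
  | (.LC, out), c =>
      if c = '\r' ∨ c = '\n' then (.N, out ++ [c]) else (.LC, out)
  | (.BC, out), c => if c = '*' then (.BCS, out) else (.BC, out)
  | (.BCS, out), c =>
      if c = '/' then (.N, out)
      else if c = '*' then (.BCS, out)
      else (.BC, out)

-- the final `if mode == SL: out.append('/')`
def pvFlushB : PvMode × List Char → List Char
  | (m, out) => if m = .SL then out ++ ['/'] else out

def strip_json5_comments_alt (text : String) : String :=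
  String.ofList (pvFlushB (text.toList.foldl pvStepB (.N, [])))

-- ===== PRECONDITION & SPEC =====
def Spec_strip_json5_comments (text : String) (out : String) : Prop := out = strip_json5_comments_alt text
instance (text : String) (out : String) : Decidable (Spec_strip_json5_comments text out) := by unfold Spec_strip_json5_comments; infer_instance

-- ===== CLAIM (what is proved, stated in full; the proofs are below) =====
def Claim_equal_strip_json5_comments : Prop := ∀ (text : String), Dom_strip_json5_comments text → Spec_strip_json5_comments text (strip_json5_comments text)

-- ===== LEMMAS AND PROOFS =====
def pvRunB (l : List Char) (m : PvMode) (out : List Char) : List Char :=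
  pvFlushB (l.foldl pvStepB (m, out))

theorem pvRunB_cons (c : Char) (l : List Char) (m : PvMode) (out : List Char) :
    pvRunB (c :: l) m out = pvRunB l (pvStepB (m, out) c).1 (pvStepB (m, out) c).2 := rfl

theorem pvSkipBlock_cons (c : Char) (rest : List Char) (h : c ≠ '*') :
    pvSkipBlock (c :: rest) = pvSkipBlock rest := by
  cases rest with
  | nil => simp [pvSkipBlock]
  | cons c2 r =>
      simp only [pvSkipBlock]
      rw [if_neg]
      intro hc
      exact h hc.1

theorem pvGoA_nil (b e : Bool) (out : List Char) : pvGoA [] b e out = out := by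
  conv_lhs => rw [pvGoA.eq_def]

-- the simultaneous state correspondence between A's loop and B's DFA
theorem pvCorr : ∀ n : Nat, ∀ l : List Char, l.length ≤ n → ∀ out : List Char,
    (pvGoA l false false out = pvRunB l .N out) ∧
    (pvGoA l true false out = pvRunB l .S out) ∧
    (pvGoA l true true out = pvRunB l .SE out) ∧
    (pvGoA ('/' :: l) false false out = pvRunB l .SL out) ∧
    (pvGoA (pvSkipLine l) false false out = pvRunB l .LC out) ∧
    (pvGoA (pvSkipBlock l) false false out = pvRunB l .BC out) ∧
    (pvGoA (pvSkipBlock ('*' :: l)) false false out = pvRunB l .BCS out) := by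
  have base : ∀ out : List Char,
      (pvGoA [] false false out = pvRunB [] .N out) ∧
      (pvGoA [] true false out = pvRunB [] .S out) ∧
      (pvGoA [] true true out = pvRunB [] .SE out) ∧
      (pvGoA ('/' :: []) false false out = pvRunB [] .SL out) ∧
      (pvGoA (pvSkipLine []) false false out = pvRunB [] .LC out) ∧
      (pvGoA (pvSkipBlock []) false false out = pvRunB [] .BC out) ∧
      (pvGoA (pvSkipBlock ('*' :: [])) false false out = pvRunB [] .BCS out) := by
    intro out
    refine ⟨?_, ?_, ?_, ?_, ?_, ?_, ?_⟩
    · simp [pvGoA_nil, pvRunB, pvFlushB]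
    · simp [pvGoA_nil, pvRunB, pvFlushB]
    · simp [pvGoA_nil, pvRunB, pvFlushB]
    · conv_lhs => rw [pvGoA.eq_def]
      simp [pvGoA_nil, pvRunB, pvFlushB]
    · simp [pvSkipLine, pvGoA_nil, pvRunB, pvFlushB]
    · simp [pvSkipBlock, pvGoA_nil, pvRunB, pvFlushB]
    · simp [pvSkipBlock, pvGoA_nil, pvRunB, pvFlushB]
  intro n
  induction n with
  | zero =>
      intro l hl out
      have hnil : l = [] := List.eq_nil_of_length_eq_zero (Nat.le_zero.mp hl)
      subst hnil
      exact base out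
  | succ n ih =>
      intro l hl out
      cases l with
      | nil => exact base out
      | cons c rest =>
          have hr : rest.length ≤ n := by
            simp only [List.length_cons] at hl; omega
          refine ⟨?_, ?_, ?_, ?_, ?_, ?_, ?_⟩
          · -- mode N
            rcases eq_or_ne c '"' with rfl | hq
            · conv_lhs => rw [pvGoA.eq_def]
              simpa [pvRunB_cons, pvStepB] using (ih rest hr (out ++ ['"'])).2.1
            · rcases eq_or_ne c '/' with rfl | hs
              · -- a '/' in mode N is exactly the pending-slash correspondence
                rw [(ih rest hr out).2.2.2.1]
                simp [pvRunB_cons, pvStepB]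
              · conv_lhs => rw [pvGoA.eq_def]
                simpa [pvRunB_cons, pvStepB, hq, hs] using (ih rest hr (out ++ [c])).1
          · -- mode S
            conv_lhs => rw [pvGoA.eq_def]
            rcases eq_or_ne c '\\' with rfl | hb
            · simpa [pvRunB_cons, pvStepB] using (ih rest hr (out ++ ['\\'])).2.2.1
            · rcases eq_or_ne c '"' with rfl | hq
              · simpa [pvRunB_cons, pvStepB] using (ih rest hr (out ++ ['"'])).1
              · simpa [pvRunB_cons, pvStepB, hb, hq] using (ih rest hr (out ++ [c])).2.1
          · -- mode SE
            conv_lhs => rw [pvGoA.eq_def]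
            simpa [pvRunB_cons, pvStepB] using (ih rest hr (out ++ [c])).2.1
          · -- mode SL (pending slash): pvGoA ('/' :: c :: rest)
            conv_lhs => rw [pvGoA.eq_def]
            rcases eq_or_ne c '/' with rfl | h1
            · simpa [pvRunB_cons, pvStepB] using (ih rest hr out).2.2.2.2.1
            · rcases eq_or_ne c '*' with rfl | h2
              · simpa [pvRunB_cons, pvStepB] using (ih rest hr out).2.2.2.2.2.1
              · -- the pending '/' is emitted, then c is handled in mode N
                simp only [if_neg (by decide : ¬('/' : Char) = '"'),
                  if_neg h1, if_neg h2]
                conv_lhs => rw [pvGoA.eq_def]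
                rcases eq_or_ne c '"' with rfl | hq
                · simpa [pvRunB_cons, pvStepB] using (ih rest hr (out ++ ['/', '"'])).2.1
                · simpa [pvRunB_cons, pvStepB, h1, h2, hq] using (ih rest hr (out ++ ['/', c])).1
          · -- mode LC
            by_cases hn : c = '\r' ∨ c = '\n'
            · rw [show pvSkipLine (c :: rest) = c :: rest from by simp [pvSkipLine, hn]]
              conv_lhs => rw [pvGoA.eq_def]
              rcases hn with rfl | rfl
              · simpa [pvRunB_cons, pvStepB] using (ih rest hr (out ++ ['\r'])).1
              · simpa [pvRunB_cons, pvStepB] using (ih rest hr (out ++ ['\n'])).1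
            · rw [show pvSkipLine (c :: rest) = pvSkipLine rest from by simp [pvSkipLine, hn]]
              simpa [pvRunB_cons, pvStepB, hn] using (ih rest hr out).2.2.2.2.1
          · -- mode BC
            rcases eq_or_ne c '*' with rfl | hst
            · simpa [pvRunB_cons, pvStepB] using (ih rest hr out).2.2.2.2.2.2
            · rw [pvSkipBlock_cons c rest hst]
              simpa [pvRunB_cons, pvStepB, hst] using (ih rest hr out).2.2.2.2.2.1
          · -- mode BCS
            rcases eq_or_ne c '/' with rfl | h1
            · rw [show pvSkipBlock ('*' :: '/' :: rest) = rest from by simp [pvSkipBlock]]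
              simpa [pvRunB_cons, pvStepB] using (ih rest hr out).1
            · rcases eq_or_ne c '*' with rfl | h2
              · rw [show pvSkipBlock ('*' :: '*' :: rest) = pvSkipBlock ('*' :: rest) from by
                      simp [pvSkipBlock]]
                simpa [pvRunB_cons, pvStepB] using (ih rest hr out).2.2.2.2.2.2
              · rw [show pvSkipBlock ('*' :: c :: rest) = pvSkipBlock (c :: rest) from by
                      simp only [pvSkipBlock]; rw [if_neg]; rintro ⟨-, hc⟩; exact h1 hc,
                    pvSkipBlock_cons c rest h2]
                simpa [pvRunB_cons, pvStepB, h1, h2] using (ih rest hr out).2.2.2.2.2.1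

-- ===== VERDICT (by name: the statement is the Claim_ definition above) =====
theorem strip_json5_comments_spec : Claim_equal_strip_json5_comments := by
  intro text _
  unfold Spec_strip_json5_comments strip_json5_comments strip_json5_comments_alt
  rw [(pvCorr text.toList.length text.toList (Nat.le_refl _) []).1]
  rfl
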